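-- pv_equiv track=rewrite | github.com/eronekogin/leetcode | Accepted/numbers_with_repeated_digits.py | numDupDigitsAtMostN
-- ===== SOURCE A (Python) =====
-- from math import perm
--
-- def numDupDigitsAtMostN(n: int) -> int:
--     """
--     1. Transfer the problem to find the total number of positive integers
--         that have non-repeating digits.
--     2. Suppose n has k digits:
--         2.1 Find all the candidate numbers having less than k digits, then
--             for i in range(1, k), each i digits have 9 * perm(9, i - 1)
--             permutations. This is because the first digit could not be 0
--             as leading zero is illegal, but the remaining digits could
--             have zero.
--         2.2 Then consider the numbers that having exactly k digits,
--             suppose n = 8756, then we should check: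
--             2.2.1 1xxx to 7xxx
--             2.2.2 80xx to 86xx
--             2.2.3 870x to 874x
--             2.2.4 8750 to 8756
--     """
--     # Padding n to n + 1 so that when checking the numbers having exactly
--     # k digits, we don't need to pad any longer because of the range
--     # function in python.
--     digits = [int(c) for c in str(n + 1)]
--     K = len(digits)
--     cnt = 0
--
--     # Count the number of non-repeating positive integers that have
--     # less digits than K.
--     for i in range(1, K):
--         cnt += 9 * perm(9, i - 1)
--
--     # Now count the number of non-repeating positive integers that
--     # have exactly K digits.
--     seen = set()
--     for i, currDigit in enumerate(digits):
--         for digit in range(0 if i else 1, currDigit):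
--             # Should not dup with the previous digits.
--             if digit not in seen:
--                 cnt += perm(10 - i - 1, K - i - 1)
--
--         # Skip processing as the number itself has dup digits now.
--         if currDigit in seen:
--             break
--
--         seen.add(currDigit)
--
--     return n - cnt
-- ===== SOURCE B (Python) =====
-- def numDupDigitsAtMostN(n: int) -> int:
--     """Count numbers in [1, n] with a repeated digit, as n minus the count of
--     distinct-digit numbers, computed by a recursive tight-prefix digit walk
--     (no closed-form perm calls)."""
--     ds = [int(c) for c in str(n + 1)]
--     K = len(ds)
--
--     def free(j, u):
--         # distinct-digit fillings of j remaining positions when u digits are used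
--         if j == 0:
--             return 1
--         return (10 - u) * free(j - 1, u + 1)
--
--     def shorter(j):
--         # positive distinct-digit numbers having at most j digits
--         if j == 0:
--             return 0
--         return shorter(j - 1) + 9 * free(j - 1, 1)
--
--     def tight(rest, i, seen):
--         # distinct-digit numbers below n+1 whose first i digits equal n+1's
--         if not rest:
--             return 0
--         cur = rest[0]
--         if i == 0:
--             if cur == 0:
--                 return 0
--             total = shorter(K - 1)
--             lo = 1
--         else:
--             total = 0
--             lo = 0
--         for d in range(lo, cur):
--             if d not in seen:
--                 total += free(K - i - 1, len(seen) + 1)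
--         if cur in seen:
--             return total
--         return total + tight(rest[1:], i + 1, seen | {cur})
--
--     return n - tight(ds, 0, set())
-- ===== Notes on version B (the rewrite author's own statement) =====
-- stated objective: alternative
-- what changed: Replaces A's closed-form math.perm counting (a range loop for shorter lengths plus an enumerate/break scan) by a recursive tight-prefix digit walk: a recursion free(j,u) builds the falling products, shorter(j) recursively accumulates the fewer-digit counts, and tight recurses down the digit list of n+1 carrying the seen set.
import Mathlib
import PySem

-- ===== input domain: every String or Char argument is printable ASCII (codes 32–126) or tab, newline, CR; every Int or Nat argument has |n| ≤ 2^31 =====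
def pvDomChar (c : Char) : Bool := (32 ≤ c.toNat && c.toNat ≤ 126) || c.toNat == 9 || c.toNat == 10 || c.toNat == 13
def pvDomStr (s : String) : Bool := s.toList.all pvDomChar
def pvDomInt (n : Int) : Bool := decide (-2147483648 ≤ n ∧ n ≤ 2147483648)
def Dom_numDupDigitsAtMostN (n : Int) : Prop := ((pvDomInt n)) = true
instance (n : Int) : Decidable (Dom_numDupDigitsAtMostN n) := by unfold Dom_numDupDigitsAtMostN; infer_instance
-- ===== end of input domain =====

-- B replaces A's math.perm closed forms and the enumerate/break scan by a recursive
-- tight-prefix digit walk (recursive products free/shorter); objective: alternative.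

-- int(c) for a single character c (both Pythons parse digits of str(n+1) this way);
-- exact on the admitted inputs, where every c is a decimal digit.
def pvCharVal (c : Char) : Int := (PySem.Int.ofChars? [c]).getD 0

-- ===== PORT A =====
-- math.perm(a, b); exact for the nonnegative arguments A evaluates it on.
def pvPerm (a b : Int) : Int := (a.toNat.descFactorial b.toNat : Int)

-- the 'for i, currDigit in enumerate(digits): …' loop with its inner range loop and break
def aScan : List Int → Int → Int → PySem.Set Int → Int → Int
  | [], _, _, _, cnt => cnt
  | cur :: rst, i, K, seen, cnt =>
    let cnt' := (PySem.List.pyRange (if i = 0 then 1 else 0) cur 1).foldl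
      (fun c d => if ¬ PySem.Set.contains seen d then c + pvPerm (10 - i - 1) (K - i - 1) else c) cnt
    if PySem.Set.contains seen cur then cnt'
    else aScan rst (i + 1) K (PySem.Set.add seen cur) cnt'

def numDupDigitsAtMostN (n : Int) : Int :=
  let digits := (PySem.Int.toStr (n + 1)).toList.map (fun c => pvCharVal c)
  let K : Int := digits.length
  let cnt := (PySem.List.pyRange 1 K 1).foldl (fun c i => c + 9 * pvPerm 9 (i - 1)) 0
  n - aScan digits 0 K PySem.Set.empty cnt

-- ===== PORT B =====
-- free(j, u): recursion on j; exact since every call has j = K - i - 1 ≥ 0.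
def bFree : Nat → Int → Int
  | 0, _ => 1
  | j + 1, u => (10 - u) * bFree j (u + 1)

-- shorter(j): recursion on j; exact since every call has j = K - 1 ≥ 0.
def bShorter : Nat → Int
  | 0 => 0
  | j + 1 => bShorter j + 9 * bFree j 1

def bTight : List Int → Int → Int → PySem.Set Int → Int
  | [], _, _, _ => 0
  | cur :: rst, i, K, seen =>
    if i = 0 ∧ cur = 0 then 0
    else
      let start : Int := if i = 0 then bShorter (K - 1).toNat else 0
      let lo : Int := if i = 0 then 1 else 0
      let total := (PySem.List.pyRange lo cur 1).foldl
        (fun t d => if ¬ PySem.Set.contains seen d then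
            t + bFree (K - i - 1).toNat (PySem.Set.len seen + 1) else t) start
      if PySem.Set.contains seen cur then total
      else total + bTight rst (i + 1) K (PySem.Set.add seen cur)

def numDupDigitsAtMostN_alt (n : Int) : Int :=
  let ds := (PySem.Int.toStr (n + 1)).toList.map (fun c => pvCharVal c)
  let K : Int := ds.length
  n - bTight ds 0 K PySem.Set.empty

-- ===== PRECONDITION & SPEC =====
-- For n ≤ -2, str(n + 1) starts with '-' and int('-') raises ValueError in both programs.
def Pre_numDupDigitsAtMostN (n : Int) : Prop := -1 ≤ n
instance (n : Int) : Decidable (Pre_numDupDigitsAtMostN n) := by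
  unfold Pre_numDupDigitsAtMostN; infer_instance

def pvWitness_numDupDigitsAtMostN : Int := 87

def Spec_numDupDigitsAtMostN (n : Int) (out : Int) : Prop := out = numDupDigitsAtMostN_alt n
instance (n : Int) (out : Int) : Decidable (Spec_numDupDigitsAtMostN n out) := by unfold Spec_numDupDigitsAtMostN; infer_instance

-- ===== CLAIM (what is proved, stated in full; the proofs are below) =====
def Claim_equal_numDupDigitsAtMostN : Prop := ∀ (n : Int), Dom_numDupDigitsAtMostN n → Pre_numDupDigitsAtMostN n → Spec_numDupDigitsAtMostN n (numDupDigitsAtMostN n)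

-- ===== LEMMAS AND PROOFS =====

-- Both inner range loops add a constant whenever the digit is unseen:
-- they are 'init + (number of unseen digits in the range) * constant'.
theorem pvFoldIf (seen : PySem.Set Int) (l : List Int) (x c0 : Int) :
    l.foldl (fun c d => if ¬ PySem.Set.contains seen d then c + x else c) c0
      = c0 + (l.countP (fun d => !PySem.Set.contains seen d)) * x := by
  induction l generalizing c0 with
  | nil => simp
  | cons a l ih =>
    rw [List.foldl_cons, List.countP_cons]
    cases hb : PySem.Set.contains seen a with
    | true => rw [if_neg (by decide), if_neg (by decide), ih]; push_cast; ring
    | false => rw [if_pos (by decide), if_pos (by decide), ih]; push_cast; ring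

-- free(j, u) is the falling product perm(10 - u, j).
theorem bFree_eq : ∀ (j u : Nat), u ≤ 10 → bFree j (u : Int) = ((10 - u).descFactorial j : Int) := by
  intro j
  induction j with
  | zero => intro u _; simp [bFree]
  | succ j ih =>
    intro u hu
    rcases Nat.lt_or_ge u 10 with h | h
    · have h9 : u ≤ 9 := by omega
      have := ih (u + 1) (by omega)
      have hcast : ((u : Int) + 1) = ((u + 1 : Nat) : Int) := by push_cast; ring
      have h10 : 10 - u = (9 - u) + 1 := by omega
      have h9u : 10 - (u + 1) = 9 - u := by omega
      rw [h9u] at this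
      rw [bFree, hcast, this, h10, Nat.succ_descFactorial_succ]
      push_cast [h10]
      rw [show ((10 : Int) - u) = ((9 - u : Nat) : Int) + 1 from by omega]
    · have hu10 : u = 10 := by omega
      subst hu10
      rw [bFree]
      norm_num [Nat.zero_descFactorial_succ]

-- shorter(j) equals A's fewer-digits loop  'for i in range(1, K): cnt += 9 * perm(9, i-1)'.
theorem bShorter_eq : ∀ j : Nat,
    bShorter j = (PySem.List.pyRange 1 ((j : Int) + 1) 1).foldl
      (fun c i => c + 9 * pvPerm 9 (i - 1)) 0 := by
  intro j
  induction j with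
  | zero => simp [bShorter, PySem.List.pyRange_one_eq_nil]
  | succ j ih =>
    have hsp : PySem.List.pyRange 1 (((j : Int) + 1) + 1) 1
        = PySem.List.pyRange 1 ((j : Int) + 1) 1 ++ [(j : Int) + 1] :=
      PySem.List.pyRange_one_succ_right (by omega)
    have : ((j + 1 : Nat) : Int) + 1 = ((j : Int) + 1) + 1 := by push_cast; ring
    rw [bShorter, ih, this, hsp, List.foldl_append]
    have hfree : bFree j 1 = ((Nat.descFactorial 9 j : Nat) : Int) := by
      have := bFree_eq j 1 (by omega)
      simpa using this
    simp [hfree, pvPerm]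

-- at most 10 distinct decimal digits: a nodup set of digits missing one has ≤ 9 elements
theorem seen_len_le (s : List Int) (hnd : s.Nodup) (hb : ∀ x ∈ s, 0 ≤ x ∧ x ≤ 9)
    (d : Int) (hd0 : 0 ≤ d) (hd9 : d ≤ 9) (hds : d ∉ s) : s.length ≤ 9 := by
  have hnd' : (d :: s).Nodup := by simp [List.nodup_cons, hds, hnd]
  have hsub : (d :: s).toFinset ⊆ Finset.Icc (0 : Int) 9 := by
    intro x hx
    simp only [List.mem_toFinset, List.mem_cons] at hx
    rcases hx with rfl | hx
    · simp [Finset.mem_Icc]; omega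
    · rcases hb x hx with ⟨h1, h2⟩
      simp [Finset.mem_Icc]; omega
  have hcard := Finset.card_le_card hsub
  rw [List.toFinset_card_of_nodup hnd', Int.card_Icc] at hcard
  simp at hcard
  omega

theorem contains_iff (s : PySem.Set Int) (d : Int) :
    PySem.Set.contains s d = true ↔ d ∈ s := by
  simp [PySem.Set.contains]

-- main invariant: from position i ≥ 1 on, A's scan adds exactly B's tight count
theorem scan_eq (K : Int) : ∀ (rest : List Int) (iN : Nat) (seen : PySem.Set Int) (cnt : Int),
    1 ≤ iN → seen.Nodup → (∀ x ∈ seen, 0 ≤ x ∧ x ≤ 9) → seen.length = iN →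
    (∀ d ∈ rest, 0 ≤ d ∧ d ≤ 9) →
    aScan rest (iN : Int) K seen cnt = cnt + bTight rest (iN : Int) K seen := by
  intro rest
  induction rest with
  | nil => intro iN seen cnt _ _ _ _ _; simp [aScan, bTight]
  | cons cur rst ih =>
    intro iN seen cnt h1 hnd hb hlen hrest
    have hi0 : ¬ ((iN : Int) = 0) := by omega
    rw [aScan, bTight]
    simp only [hi0, if_false, false_and]
    rw [pvFoldIf, pvFoldIf]
    set m : Nat := (PySem.List.pyRange 0 cur 1).countP
        (fun d => !PySem.Set.contains seen d) with hm
    have hxy : (m : Int) * pvPerm (10 - (iN : Int) - 1) (K - (iN : Int) - 1)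
        = (m : Int) * bFree (K - (iN : Int) - 1).toNat (PySem.Set.len seen + 1) := by
      rcases Nat.eq_zero_or_pos m with hz | hpos
      · simp [hz]
      · -- some digit d in the range is unseen; bound the seen set, then both constants agree
        have hpos' : 0 < (PySem.List.pyRange 0 cur 1).countP
            (fun d => !PySem.Set.contains seen d) := by rw [← hm]; omega
        obtain ⟨d, hdmem, hdp⟩ := List.countP_pos_iff.mp hpos' 
        rw [PySem.List.mem_pyRange_one] at hdmem
        have hcur := hrest cur (by simp)
        have hdseen : d ∉ seen := by simpa using hdp
        have hle : seen.length ≤ 9 :=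
          seen_len_le seen hnd hb d (by omega) (by omega) hdseen
        have hiN9 : iN ≤ 9 := by omega
        have hlenI : PySem.Set.len seen + 1 = ((iN + 1 : Nat) : Int) := by
          simp [PySem.Set.len, hlen]
        rw [hlenI, bFree_eq _ (iN + 1) (by omega)]
        have h1' : (10 - (iN : Int) - 1).toNat = 10 - (iN + 1) := by omega
        simp [pvPerm, h1']
    rw [hxy]
    cases hcb : PySem.Set.contains seen cur with
    | true =>
      have hmemc : cur ∈ seen := (contains_iff seen cur).mp hcb
      simp
    | false =>
      have hmemc : cur ∉ seen := fun h => by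
        rw [(contains_iff seen cur).mpr h] at hcb; cases hcb
      have hadd : PySem.Set.add seen cur = seen ++ [cur] := by simp [PySem.Set.add, hmemc]
      have hinv2 : (seen ++ [cur]).Nodup :=
        hnd.append (List.nodup_singleton cur) (by simp [List.disjoint_singleton, hmemc])
      have hinv3 : ∀ x ∈ seen ++ [cur], 0 ≤ x ∧ x ≤ 9 := by
        intro x hx
        rcases List.mem_append.mp hx with hx | hx
        · exact hb x hx
        · have hxc : x = cur := by simpa using hx
          rw [hxc]; exact hrest cur (by simp)
      have hinv4 : (seen ++ [cur]).length = iN + 1 := by simp [hlen]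
      have hrec := ih (iN + 1) (seen ++ [cur])
        (cnt + (m : Int) * bFree (K - (iN : Int) - 1).toNat (PySem.Set.len seen + 1))
        (by omega) hinv2 hinv3 hinv4 (fun d hd => hrest d (by simp [hd]))
      have hcast : ((iN : Int) + 1) = ((iN + 1 : Nat) : Int) := by push_cast; ring
      simp only [Bool.false_eq_true, if_false, hadd]
      rw [hcast, hrec]
      ring

-- every character produced by Nat.toDigitsCore is an accumulator character or a digitChar
theorem toDigitsCore_chars : ∀ (f n : Nat) (acc : List Char) (c : Char),
    c ∈ Nat.toDigitsCore 10 f n acc → c ∈ acc ∨ ∃ k, k < 10 ∧ c = Nat.digitChar k := by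
  intro f
  induction f with
  | zero => intro n acc c hc; exact Or.inl hc
  | succ f ih =>
    intro n acc c hc
    rw [Nat.toDigitsCore] at hc
    by_cases h : n / 10 = 0
    · simp only [h, if_true] at hc
      rcases List.mem_cons.mp hc with rfl | hmem
      · exact Or.inr ⟨n % 10, Nat.mod_lt _ (by omega), rfl⟩
      · exact Or.inl hmem
    · simp only [h, if_false] at hc
      rcases ih (n / 10) _ c hc with hmem | hdig
      · rcases List.mem_cons.mp hmem with rfl | hmem'
        · exact Or.inr ⟨n % 10, Nat.mod_lt _ (by omega), rfl⟩
        · exact Or.inl hmem'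
      · exact Or.inr hdig

-- for 1 ≤ n (with enough fuel) the leading character is a nonzero digitChar
theorem toDigitsCore_head : ∀ (f n : Nat) (acc : List Char), 1 ≤ n → n < 10 ^ f →
    ∃ k tl, Nat.toDigitsCore 10 f n acc = Nat.digitChar k :: tl ∧ 1 ≤ k ∧ k < 10 := by
  intro f
  induction f with
  | zero => intro n acc h1 h2; simp at h2; omega
  | succ f ih =>
    intro n acc h1 h2
    rw [Nat.toDigitsCore]
    by_cases h : n / 10 = 0
    · have hn10 : n < 10 := by omega
      have : n % 10 = n := Nat.mod_eq_of_lt hn10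
      exact ⟨n % 10, acc, by simp [h], by omega, by omega⟩
    · simp only [h, if_false]
      exact ih (n / 10) _ (by omega) (by
        have : n < 10 ^ f * 10 := by rw [← pow_succ]; exact h2
        omega)

theorem digitChar_val (k : Nat) (hk : k < 10) :
    pvCharVal (Nat.digitChar k) = (k : Int) := by
  interval_cases k <;> decide

theorem toDigits_bounds (m : Nat) (c : Char) (hc : c ∈ Nat.toDigits 10 m) :
    0 ≤ pvCharVal c ∧ pvCharVal c ≤ 9 := by
  rcases toDigitsCore_chars (m + 1) m [] c hc with h | ⟨k, hk, rfl⟩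
  · simp at h
  · rw [digitChar_val k hk]; omega

theorem toDigits_head (m : Nat) (hm : 1 ≤ m) :
    ∃ c tl, Nat.toDigits 10 m = c :: tl ∧ 1 ≤ pvCharVal c ∧ pvCharVal c ≤ 9 := by
  have hfuel : m < 10 ^ (m + 1) := by
    calc m < 10 ^ m := Nat.lt_pow_self (by omega)
    _ ≤ 10 ^ (m + 1) := Nat.pow_le_pow_right (by omega) (by omega)
  obtain ⟨k, tl, heq, hk1, hk10⟩ := toDigitsCore_head (m + 1) m [] hm hfuel
  refine ⟨Nat.digitChar k, tl, heq, ?_, ?_⟩ <;> rw [digitChar_val k hk10] <;> omega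

-- at position 0 (nonzero leading digit, empty seen set) A's scan started on its
-- fewer-digits total equals B's tight walk
theorem top_eq (d0 : Int) (rest : List Int) (K : Int) (hK : K = (rest.length : Int) + 1)
    (hc1 : 1 ≤ d0) (hc9 : d0 ≤ 9) (hrestb : ∀ d ∈ rest, 0 ≤ d ∧ d ≤ 9) :
    aScan (d0 :: rest) 0 K PySem.Set.empty
        ((PySem.List.pyRange 1 K 1).foldl (fun c i => c + 9 * pvPerm 9 (i - 1)) 0)
      = bTight (d0 :: rest) 0 K PySem.Set.empty := by
  rw [aScan, bTight]
  rw [if_neg (show ¬ ((0 : Int) = 0 ∧ d0 = 0) from fun ⟨_, h⟩ => by omega)]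
  norm_num
  have hfoldc : ∀ (l : List Int) (x c0 : Int),
      l.foldl (fun c _ => c + x) c0 = c0 + (l.length : Int) * x := by
    intro l x
    induction l with
    | nil => intro c0; simp
    | cons a l ih => intro c0; rw [List.foldl_cons, ih, List.length_cons]; push_cast; ring
  have hK1 : 1 ≤ K := by omega
  have hxy : pvPerm 9 (K - 1) = bFree (K.toNat - 1) 1 := by
    have h2 := bFree_eq (K.toNat - 1) 1 (by omega)
    norm_num at h2
    have h1 : (K - 1).toNat = K.toNat - 1 := by omega
    simp [pvPerm, h1, h2]
  have hshort : (PySem.List.pyRange 1 K 1).foldl (fun c i => c + 9 * pvPerm 9 (i - 1)) 0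
      = bShorter (K.toNat - 1) := by
    have h1 : K.toNat - 1 = rest.length := by omega
    rw [h1, bShorter_eq rest.length]
    have h2 : ((rest.length : Int)) + 1 = K := by omega
    rw [h2]
  have hscan := scan_eq K rest 1 [d0]
    ((PySem.List.pyRange 1 K 1).foldl (fun c i => c + 9 * pvPerm 9 (i - 1)) 0
      + ((PySem.List.pyRange 1 d0 1).length : Int) * bFree (K.toNat - 1) 1)
    (by omega) (by simp) (by intro x hx; simp at hx; subst hx; constructor <;> omega)
    (by simp) hrestb
  simp only [Nat.cast_one] at hscan
  rw [hfoldc, hfoldc, hxy, hscan, hshort]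

-- ===== VERDICT (by name: the statement is the Claim_ definition above) =====
theorem numDupDigitsAtMostN_spec : Claim_equal_numDupDigitsAtMostN := by
  intro n _ hpre
  unfold Spec_numDupDigitsAtMostN
  rcases eq_or_lt_of_le hpre with hm1 | hpos
  · -- n = -1 : both sides compute on digits [0]
    rw [← hm1]; decide
  · -- 0 ≤ n : the digits of n + 1 ≥ 1 start with a nonzero digit
    have hn0 : 0 ≤ n := by omega
    have hm1 : 1 ≤ (n + 1).toNat := by omega
    have hchars : (PySem.Int.toStr (n + 1)).toList = Nat.toDigits 10 (n + 1).toNat := by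
      rw [PySem.Int.toList_toStr, PySem.Int.toChars]
      have : ¬ (n + 1 < 0) := by omega
      simp [this]
    obtain ⟨c0, cs, hds, hc1, hc9⟩ := toDigits_head (n + 1).toNat hm1
    have hrestb : ∀ d ∈ cs.map (fun c => pvCharVal c), 0 ≤ d ∧ d ≤ 9 := by
      intro d hd
      obtain ⟨c, hc, rfl⟩ := List.mem_map.mp hd
      exact toDigits_bounds _ c (by rw [hds]; exact List.mem_cons_of_mem _ hc)
    unfold numDupDigitsAtMostN numDupDigitsAtMostN_alt
    rw [hchars, hds]
    simp only [List.map_cons, List.length_cons]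
    rw [top_eq (pvCharVal c0) (cs.map (fun c => pvCharVal c)) _ (by push_cast; ring)
      hc1 hc9 hrestb]
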